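-- pv_equiv track=rewrite | github.com/deepanshkhanna/Meta-Final | driftdesk/server/reward_engine.py | _is_grounded_edit
-- ===== SOURCE A (Python) =====
-- from typing import Any, Dict, List, Optional, Tuple
--
-- def _is_grounded_edit(
--     new_payload: Dict[str, Any],
--     old_payload: Dict[str, Any],
--     changed_fields: List[str],
-- ) -> bool:
--     """True if agent changed *only* the fields listed in the drift error."""
--     added = set(new_payload) - set(old_payload)
--     removed = set(old_payload) - set(new_payload)
--     mutated = {k for k in new_payload if k in old_payload and new_payload[k] != old_payload[k]}
--     all_changes = added | removed | mutated
--     if not all_changes: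
--         return False
--     return all_changes.issubset(set(changed_fields))
-- ===== SOURCE B (Python) =====
-- def _is_grounded_edit(new_payload, old_payload, changed_fields):
--     """Grounded iff the payloads agree exactly outside the listed drift fields
--     but are not equal overall: compare the payloads with the allowed keys
--     stripped out, then the full payloads."""
--     allowed = set(changed_fields)
--     frozen_new = {k: v for k, v in new_payload.items() if k not in allowed}
--     frozen_old = {k: v for k, v in old_payload.items() if k not in allowed}
--     return frozen_new == frozen_old and new_payload != old_payload
-- ===== Notes on version B (the rewrite author's own statement) =====
-- stated objective: simpler
-- what changed: B decides groundedness by dictionary comparison instead of change-set construction: it strips the allowed drift fields from both payloads and returns True iff the stripped payloads are equal while the full payloads are not, replacing the added/removed/mutated sets, their union, the emptiness test and the issubset call.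
import Mathlib
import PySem

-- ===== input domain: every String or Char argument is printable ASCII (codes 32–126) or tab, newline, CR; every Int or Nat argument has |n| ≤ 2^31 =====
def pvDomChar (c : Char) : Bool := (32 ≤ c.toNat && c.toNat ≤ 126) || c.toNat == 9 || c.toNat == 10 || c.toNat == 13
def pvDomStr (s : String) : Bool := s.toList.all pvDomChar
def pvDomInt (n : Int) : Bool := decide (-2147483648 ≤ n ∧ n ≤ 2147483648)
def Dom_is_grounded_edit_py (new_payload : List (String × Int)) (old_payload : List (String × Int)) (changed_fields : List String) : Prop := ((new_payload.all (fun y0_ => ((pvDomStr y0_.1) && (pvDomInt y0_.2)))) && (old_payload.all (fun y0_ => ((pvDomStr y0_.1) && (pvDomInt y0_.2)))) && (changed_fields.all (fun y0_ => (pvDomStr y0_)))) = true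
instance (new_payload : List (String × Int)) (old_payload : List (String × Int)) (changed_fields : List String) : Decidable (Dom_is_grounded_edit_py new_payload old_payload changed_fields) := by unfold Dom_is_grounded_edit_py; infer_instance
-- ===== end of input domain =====

-- B replaces A's change-set construction (added/removed/mutated, union, issubset)
-- by dictionary comparison: strip the allowed keys from both payloads, then the
-- edit is grounded iff the stripped payloads are equal and the full ones are not
-- (objective: simpler decomposition, same cost).

-- ===== PORT A =====
-- literal transliteration of A: build added / removed / mutated, union them,
-- empty → False, else issubset of set(changed_fields)
def is_grounded_edit_py (new_payload : List (String × Int)) (old_payload : List (String × Int)) (changed_fields : List String) : Bool :=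
  let nd := PySem.Dict.ofList new_payload
  let od := PySem.Dict.ofList old_payload
  let added := PySem.Set.diff (PySem.Set.ofList nd.keys) (PySem.Set.ofList od.keys)
  let removed := PySem.Set.diff (PySem.Set.ofList od.keys) (PySem.Set.ofList nd.keys)
  -- {k for k in new_payload if k in old_payload and new_payload[k] != old_payload[k]}
  let mutated := PySem.Set.ofList (nd.keys.filter (fun k => od.contains k && !(nd.get? k == od.get? k)))
  let all_changes := PySem.Set.union (PySem.Set.union added removed) mutated
  if all_changes = [] then false
  else PySem.Set.issubset all_changes (PySem.Set.ofList changed_fields)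

-- ===== PORT B =====
-- Python's dict == ignores insertion order: same size and every item of the
-- left dict is found in the right one (this helper IS that comparison)
def pyDictEq (d e : PySem.Dict String Int) : Bool :=
  d.size == e.size && d.items.all (fun kv => e.get? kv.1 == some kv.2)

-- {k: v for k, v in d.items() if k not in allowed}
def pyStrip (d : PySem.Dict String Int) (allowed : PySem.Set String) : PySem.Dict String Int :=
  PySem.Dict.mk (d.items.filter (fun kv => !(allowed.contains kv.1)))

def is_grounded_edit_py_alt (new_payload : List (String × Int)) (old_payload : List (String × Int)) (changed_fields : List String) : Bool :=
  let nd := PySem.Dict.ofList new_payload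
  let od := PySem.Dict.ofList old_payload
  let allowed := PySem.Set.ofList changed_fields
  let frozen_new := pyStrip nd allowed
  let frozen_old := pyStrip od allowed
  pyDictEq frozen_new frozen_old && !(pyDictEq nd od)

-- ===== PRECONDITION & SPEC =====
def Spec_is_grounded_edit_py (new_payload : List (String × Int)) (old_payload : List (String × Int)) (changed_fields : List String) (out : Bool) : Prop := out = is_grounded_edit_py_alt new_payload old_payload changed_fields
instance (new_payload : List (String × Int)) (old_payload : List (String × Int)) (changed_fields : List String) (out : Bool) : Decidable (Spec_is_grounded_edit_py new_payload old_payload changed_fields out) := by unfold Spec_is_grounded_edit_py; infer_instance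

-- ===== CLAIM (what is proved, stated in full; the proofs are below) =====
def Claim_equal_is_grounded_edit_py : Prop := ∀ (new_payload : List (String × Int)) (old_payload : List (String × Int)) (changed_fields : List String), Dom_is_grounded_edit_py new_payload old_payload changed_fields → Spec_is_grounded_edit_py new_payload old_payload changed_fields (is_grounded_edit_py new_payload old_payload changed_fields)

-- ===== LEMMAS AND PROOFS =====

-- lookup in a dict whose items were filtered by a key-only predicate
theorem get?_mk_filter_key (l : List (String × Int)) (p : String → Bool) (k : String) :
    (PySem.Dict.mk (l.filter (fun kv => p kv.1))).get? k =
      if p k then (PySem.Dict.mk l).get? k else none := by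
  induction l with
  | nil => simp [PySem.Dict.get?]
  | cons kv rest ih =>
    obtain ⟨k1, v1⟩ := kv
    by_cases hp : p k1 = true
    · by_cases hk : k1 = k
      · subst hk
        simp [hp, PySem.Dict.get?_mk_cons]
      · simp [hp, PySem.Dict.get?_mk_cons, hk, ih]
    · rw [Bool.not_eq_true] at hp
      by_cases hk : k1 = k
      · subst hk
        simp [hp, ih]
      · simp [hp, PySem.Dict.get?_mk_cons, hk, ih]

theorem get?_pyStrip (d : PySem.Dict String Int) (allowed : PySem.Set String) (k : String) :
    (pyStrip d allowed).get? k = if !(allowed.contains k) then d.get? k else none :=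
  get?_mk_filter_key d.items (fun x => !(allowed.contains x)) k

theorem nodup_keys_mk_filter (l : List (String × Int)) (p : String × Int → Bool)
    (h : (PySem.Dict.mk l).keys.Nodup) : (PySem.Dict.mk (l.filter p)).keys.Nodup := by
  simp only [PySem.Dict.keys] at h ⊢
  exact (List.Sublist.map Prod.fst List.filter_sublist).nodup h

-- Python dict == : with unique keys on both sides it is pointwise lookup equality
theorem pyDictEq_iff (d e : PySem.Dict String Int)
    (hd : d.keys.Nodup) (he : e.keys.Nodup) :
    pyDictEq d e = true ↔ ∀ k, d.get? k = e.get? k := by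
  unfold pyDictEq
  simp only [Bool.and_eq_true, beq_iff_eq, List.all_eq_true]
  constructor
  · rintro ⟨hsize, hitems⟩ k
    cases hg : d.get? k with
    | some v =>
      have := hitems (k, v) (PySem.Dict.mem_items_of_get?_eq_some _ hg)
      simpa using this.symm
    | none =>
      -- keys d ⊆ keys e with equal lengths and nodup ⇒ same key sets
      have hsub : d.keys ⊆ e.keys := by
        intro x hx
        obtain ⟨⟨x', v⟩, hmem, hx'⟩ := List.mem_map.mp hx
        cases hx'
        have hgx : e.get? x' = some v := by
          simpa using hitems (x', v) hmem
        exact PySem.Dict.mem_keys_of_mem_items _ (PySem.Dict.mem_items_of_get?_eq_some _ hgx)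
      have hlen : e.keys.length ≤ d.keys.length := by
        simp only [PySem.Dict.size] at hsize
        simp only [PySem.Dict.keys, List.length_map]
        omega
      have hperm : d.keys.Perm e.keys :=
        (hd.subperm hsub).perm_of_length_le hlen
      have hkn : k ∉ d.keys := (PySem.Dict.get?_eq_none_iff_not_mem_keys _ _).mp hg
      have hke : k ∉ e.keys := fun h => hkn (hperm.mem_iff.mpr h)
      exact ((PySem.Dict.get?_eq_none_iff_not_mem_keys _ _).mpr hke).symm
  · intro h
    have hmemk : ∀ k, k ∈ d.keys ↔ k ∈ e.keys := by
      intro k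
      rw [← PySem.Dict.contains_iff_mem_keys, ← PySem.Dict.contains_iff_mem_keys,
        PySem.Dict.contains_eq_isSome_get?, PySem.Dict.contains_eq_isSome_get?, h k]
    have hlen1 : d.keys.length ≤ e.keys.length :=
      (hd.subperm (fun x hx => (hmemk x).mp hx)).length_le
    have hlen2 : e.keys.length ≤ d.keys.length :=
      (he.subperm (fun x hx => (hmemk x).mpr hx)).length_le
    refine ⟨?_, ?_⟩
    · simp only [PySem.Dict.size]
      simp only [PySem.Dict.keys, List.length_map] at hlen1 hlen2
      omega
    · intro kv hkv
      obtain ⟨k1, v1⟩ := kv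
      have := PySem.Dict.get?_of_mem_items _ hkv hd
      rw [h k1] at this
      simp [this]

-- lookups characterised on both sides, then the two Boolean programs agree
theorem is_grounded_edit_py_spec : Claim_equal_is_grounded_edit_py := by
  intro new_payload old_payload changed_fields _
  unfold Spec_is_grounded_edit_py is_grounded_edit_py is_grounded_edit_py_alt
  dsimp only
  set nd := PySem.Dict.ofList new_payload with hnd
  set od := PySem.Dict.ofList old_payload with hod
  set allowed := PySem.Set.ofList changed_fields with hal
  set AC := PySem.Set.union
      (PySem.Set.union (PySem.Set.diff (PySem.Set.ofList nd.keys) (PySem.Set.ofList od.keys))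
        (PySem.Set.diff (PySem.Set.ofList od.keys) (PySem.Set.ofList nd.keys)))
      (PySem.Set.ofList (nd.keys.filter (fun k => od.contains k && !(nd.get? k == od.get? k)))) with hAC
  have hndn : nd.keys.Nodup := PySem.Dict.nodup_keys_ofList _
  have hodn : od.keys.Nodup := PySem.Dict.nodup_keys_ofList _
  have hf1n : (pyStrip nd allowed).keys.Nodup := nodup_keys_mk_filter nd.items _ hndn
  have hf2n : (pyStrip od allowed).keys.Nodup := nodup_keys_mk_filter od.items _ hodn
  -- membership in all_changes is exactly "the two lookups differ"
  have hmem : ∀ k, k ∈ AC ↔ ¬ (nd.get? k = od.get? k) := by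
    intro k
    simp only [hAC, PySem.Set.mem_union, PySem.Set.mem_diff, PySem.Set.mem_ofList,
      List.mem_filter, PySem.Dict.contains_eq_decide_mem_keys]
    by_cases hn : k ∈ nd.keys <;> by_cases ho : k ∈ od.keys
    · simp [hn, ho]
    · have h1 : od.get? k = none := (PySem.Dict.get?_eq_none_iff_not_mem_keys _ _).mpr ho
      have h2 : ¬ (nd.get? k = none) := fun h =>
        ((PySem.Dict.get?_eq_none_iff_not_mem_keys _ _).mp h) hn
      simp [hn, ho, h1, h2]
    · have h1 : nd.get? k = none := (PySem.Dict.get?_eq_none_iff_not_mem_keys _ _).mpr hn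
      have h2 : ¬ (nd.get? k = od.get? k) := fun h =>
        ((PySem.Dict.get?_eq_none_iff_not_mem_keys _ _).mp (h1 ▸ h.symm)) ho
      simp [hn, ho, h1]
      exact fun h => h2 (h1.trans h)
    · have h1 : nd.get? k = none := (PySem.Dict.get?_eq_none_iff_not_mem_keys _ _).mpr hn
      have h2 : od.get? k = none := (PySem.Dict.get?_eq_none_iff_not_mem_keys _ _).mpr ho
      simp [hn, ho, h1, h2]
  -- stripped dicts equal ⟺ every changed key is allowed
  have hB1 : pyDictEq (pyStrip nd allowed) (pyStrip od allowed) = true ↔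
      (∀ k, k ∈ AC → k ∈ allowed) := by
    rw [pyDictEq_iff _ _ hf1n hf2n]
    constructor
    · intro h k hk
      by_cases ha : k ∈ allowed
      · exact ha
      · have hc : allowed.contains k = false := by
          simp [ha]
        have := h k
        rw [get?_pyStrip, get?_pyStrip, hc] at this
        exact absurd (by simpa using this) ((hmem k).mp hk)
    · intro h k
      rw [get?_pyStrip, get?_pyStrip]
      by_cases hc : allowed.contains k = true
      · have hm : k ∈ allowed := by simpa using hc
        simp [hm]
      · rw [Bool.not_eq_true] at hc
        rw [hc]
        have ha : k ∉ allowed := fun hm => by simp [hm] at hc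
        by_cases hin : k ∈ AC
        · exact absurd (h k hin) ha
        · have := fun hne => hin ((hmem k).mpr hne)
          simpa using not_not.mp (by simpa using this)
  -- full dicts equal ⟺ no changed key at all
  have hB2 : pyDictEq nd od = true ↔ AC = [] := by
    rw [pyDictEq_iff _ _ hndn hodn, List.eq_nil_iff_forall_not_mem]
    constructor
    · intro h k hk
      exact ((hmem k).mp hk) (h k)
    · intro h k
      by_contra hne
      exact h k ((hmem k).mpr hne)
  by_cases he : AC = []
  · rw [if_pos he]
    have : pyDictEq nd od = true := hB2.mpr he
    simp [this]
  · rw [if_neg he]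
    have h2 : pyDictEq nd od = false := by
      rw [Bool.eq_false_iff]
      exact fun h => he (hB2.mp h)
    rw [h2]
    have hiff : ∀ (a b : Bool), (a = true ↔ b = true) → a = b := by decide
    apply hiff
    rw [PySem.Set.issubset_iff]
    simp only [Bool.not_false, Bool.and_true]
    exact Iff.symm hB1
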